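-- pv_equiv track=rewrite | github.com/Jastronit/Module-SCUM-ActiveQuests | widgets/quest.py | get_time_color
-- ===== SOURCE A (Python) =====
-- def get_time_color(seconds_left, color_rules):
--     try:
--         keys = sorted([int(k) for k in color_rules.keys()], reverse=True)
--         for k in keys:
--             if seconds_left >= k:
--                 return color_rules[str(k)]
--         return color_rules[str(keys[-1])] if keys else "#ffffff"
--     except Exception:
--         return "#ffffff"
-- ===== SOURCE B (Python) =====
-- def get_time_color(seconds_left, color_rules):
--     try:
--         ints = [int(k) for k in color_rules.keys()]
--         if not ints:
--             return "#ffffff"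
--         eligible = [k for k in ints if seconds_left >= k]
--         best = max(eligible) if eligible else min(ints)
--         return color_rules[str(best)]
--     except Exception:
--         return "#ffffff"
-- ===== Notes on version B (the rewrite author's own statement) =====
-- stated objective: simpler
-- what changed: Replaces sort-descending-then-linear-scan with a single extremal selection: max over the qualifying keys when any exist, else min of all keys, no ordered structure built.
import Mathlib
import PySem

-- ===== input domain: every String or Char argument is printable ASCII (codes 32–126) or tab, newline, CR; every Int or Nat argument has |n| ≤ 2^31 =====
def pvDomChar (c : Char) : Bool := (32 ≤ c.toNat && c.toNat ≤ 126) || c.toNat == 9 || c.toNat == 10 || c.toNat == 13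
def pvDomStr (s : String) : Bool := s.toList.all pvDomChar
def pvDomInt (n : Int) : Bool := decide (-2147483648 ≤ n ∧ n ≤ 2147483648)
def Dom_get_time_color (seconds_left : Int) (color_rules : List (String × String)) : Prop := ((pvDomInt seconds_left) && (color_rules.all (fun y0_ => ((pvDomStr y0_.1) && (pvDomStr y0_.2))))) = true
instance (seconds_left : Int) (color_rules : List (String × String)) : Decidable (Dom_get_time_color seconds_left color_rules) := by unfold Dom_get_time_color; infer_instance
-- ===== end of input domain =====

-- B replaces sort-then-scan by a single extremal selection (max of qualifying keys, else min); simpler, no ordering built.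
-- ===== PORT A =====
def get_time_color (seconds_left : Int) (color_rules : List (String × String)) : String :=
  let d := PySem.Dict.ofList color_rules
  match (d.keys).mapM PySem.Int.ofStr? with
  | none => "#ffffff"                    -- int(k) raised ValueError
  | some ints =>
    let keys := PySem.List.sorted ints (fun x => x) true
    match keys.find? (fun k => decide (seconds_left ≥ k)) with
    | some k =>
      match d.get? (PySem.Int.toStr k) with
      | some v => v
      | none => "#ffffff"                -- KeyError caught
    | none =>
      match keys.getLast? with
      | some k =>
        match d.get? (PySem.Int.toStr k) with
        | some v => v
        | none => "#ffffff"              -- KeyError caught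
      | none => "#ffffff"                -- keys empty

-- ===== PORT B =====
def get_time_color_alt (seconds_left : Int) (color_rules : List (String × String)) : String :=
  let d := PySem.Dict.ofList color_rules
  match (d.keys).mapM PySem.Int.ofStr? with
  | none => "#ffffff"                    -- int(k) raised ValueError
  | some ints =>
    if ints.isEmpty then "#ffffff"
    else
      let eligible := ints.filter (fun k => decide (seconds_left ≥ k))
      let best :=
        match PySem.List.max? eligible (fun x => x) with
        | some m => m
        | none => (PySem.List.min? ints (fun x => x)).getD 0
      match d.get? (PySem.Int.toStr best) with
      | some v => v
      | none => "#ffffff"                -- KeyError caught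

-- ===== PRECONDITION & SPEC =====
def Spec_get_time_color (seconds_left : Int) (color_rules : List (String × String)) (out : String) : Prop := out = get_time_color_alt seconds_left color_rules
instance (seconds_left : Int) (color_rules : List (String × String)) (out : String) : Decidable (Spec_get_time_color seconds_left color_rules out) := by unfold Spec_get_time_color; infer_instance

-- ===== CLAIM (what is proved, stated in full; the proofs are below) =====
def Claim_equal_get_time_color : Prop := ∀ (seconds_left : Int) (color_rules : List (String × String)), Dom_get_time_color seconds_left color_rules → Spec_get_time_color seconds_left color_rules (get_time_color seconds_left color_rules)

-- ===== LEMMAS AND PROOFS =====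

-- In a descending list, the first element satisfying s ≥ · bounds every satisfying element.
theorem pv_desc_find_max (s : Int) (ks : List Int)
    (hp : ks.Pairwise (fun a b => b ≤ a)) (k : Int)
    (hf : ks.find? (fun k => decide (s ≥ k)) = some k) :
    ∀ e ∈ ks, s ≥ e → e ≤ k := by
  induction ks with
  | nil => simp at hf
  | cons a t ih =>
    rw [List.pairwise_cons] at hp
    rw [List.find?_cons] at hf
    by_cases ha : s ≥ a
    · simp [ha] at hf
      subst hf
      intro e he _
      rcases List.mem_cons.mp he with h | h
      · exact le_of_eq h
      · exact hp.1 e h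
    · simp [ha] at hf
      intro e he hse
      rcases List.mem_cons.mp he with h | h
      · exact absurd (h ▸ hse) ha
      · exact ih hp.2 hf e h hse

-- The last element of a descending list is a lower bound.
theorem pv_desc_last_min (ks : List Int)
    (hp : ks.Pairwise (fun a b => b ≤ a)) (k : Int)
    (h : ks.getLast? = some k) :
    ∀ e ∈ ks, k ≤ e := by
  induction ks with
  | nil => simp at h
  | cons a t ih =>
    rw [List.pairwise_cons] at hp
    cases t with
    | nil =>
      simp at h
      subst h; intro e he; simp at he; simp [he]
    | cons b u =>
      rw [List.getLast?_cons_cons] at h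
      have htail := ih hp.2 h
      have hk_mem : k ∈ b :: u := List.mem_of_getLast? h
      intro e he
      rcases List.mem_cons.mp he with h' | h'
      · exact h' ▸ (hp.1 k hk_mem)
      · exact htail e h'

theorem get_time_color_eq_alt (seconds_left : Int) (color_rules : List (String × String)) :
    get_time_color seconds_left color_rules = get_time_color_alt seconds_left color_rules := by
  unfold get_time_color get_time_color_alt
  simp only []
  cases hmm : ((PySem.Dict.ofList color_rules).keys).mapM PySem.Int.ofStr? with
  | none => rfl
  | some ints =>
    simp only []
    have hpw : (PySem.List.sorted ints (fun x => x) true).Pairwise (fun a b => b ≤ a) := by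
      simpa using PySem.List.sorted_pairwise_rev (xs := ints) (key := fun x => x)
    have hmem : ∀ x : Int, x ∈ PySem.List.sorted ints (fun x => x) true ↔ x ∈ ints :=
      fun x => PySem.List.mem_sorted ints _ _ x
    cases hf : (PySem.List.sorted ints (fun x => x) true).find? (fun k => decide (seconds_left ≥ k)) with
    | some k =>
      have hk_sat : seconds_left ≥ k := by simpa using List.find?_some hf
      have hk_ints : k ∈ ints := (hmem k).mp (List.mem_of_find?_eq_some hf)
      have hk_elig : k ∈ ints.filter (fun k => decide (seconds_left ≥ k)) := by
        simp [List.mem_filter, hk_ints]; exact hk_sat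
      have hne : ints.filter (fun k => decide (seconds_left ≥ k)) ≠ [] :=
        fun h => by simp [h] at hk_elig
      have hnil : ints.isEmpty = false := by
        cases ints with
        | nil => exact absurd hk_ints (by simp)
        | cons a t => rfl
      cases hmax : PySem.List.max? (ints.filter (fun k => decide (seconds_left ≥ k))) (fun x => x) with
      | none => exact absurd ((PySem.List.max?_eq_none_iff _ _).mp hmax) hne
      | some m =>
        have hm_elig := PySem.List.max?_mem hmax
        have hm_ints : m ∈ ints := (List.mem_filter.mp hm_elig).1
        have hm_sat : seconds_left ≥ m := by simpa using (List.mem_filter.mp hm_elig).2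
        have hkm : m = k :=
          le_antisymm
            (pv_desc_find_max seconds_left _ hpw k hf m ((hmem m).mpr hm_ints) hm_sat)
            (PySem.List.max?_isMax hmax k hk_elig)
        simp [hnil, hkm]

    | none =>
      have hnone : ∀ e ∈ PySem.List.sorted ints (fun x => x) true, ¬ (seconds_left ≥ e) := by
        intro e he
        simpa using List.find?_eq_none.mp hf e he
      have helig : ints.filter (fun k => decide (seconds_left ≥ k)) = [] := by
        rw [List.filter_eq_nil_iff]
        intro e he
        simpa using hnone e ((hmem e).mpr he)
      cases hints : ints with
      | nil => subst hints; rfl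
      | cons a t =>
        subst hints
        have hkeys_ne : PySem.List.sorted (a :: t) (fun x => x) true ≠ [] := by
          intro h
          have : a :: t = [] := (PySem.List.sorted_eq_nil_iff _ _ _).mp h
          simp at this
        obtain ⟨klast, hlast⟩ := Option.isSome_iff_exists.mp
          (by rw [List.getLast?_isSome]; exact hkeys_ne)
        cases hmin : PySem.List.min? (a :: t) (fun x => x) with
        | none => exact absurd ((PySem.List.min?_eq_none_iff _ _).mp hmin) (by simp)
        | some m =>
          have hm_ints : m ∈ a :: t := PySem.List.min?_mem hmin
          have hkl : klast ∈ PySem.List.sorted (a :: t) (fun x => x) true := List.mem_of_getLast? hlast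
          have hkm : klast = m :=
            le_antisymm
              (pv_desc_last_min _ hpw klast hlast m ((hmem m).mpr hm_ints))
              (PySem.List.min?_isMin hmin klast ((hmem klast).mp hkl))
          simp [hlast, helig, hkm, PySem.List.max?]

-- ===== VERDICT (by name: the statement is the Claim_ definition above) =====
theorem get_time_color_spec : Claim_equal_get_time_color := by
  intro s cr _
  unfold Spec_get_time_color
  exact get_time_color_eq_alt s cr
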